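-- pv_equiv track=rewrite | github.com/RuairiB/advent-of-code-py | aoc2025/day_7/pretty_print_tree.py | reconstruct_dfs_path
-- ===== SOURCE A (Python) =====
-- def reconstruct_dfs_path(final_changes: list[dict[int, int]]) -> list[tuple[int, int]]:
--     # should have just done this for the actual solution...
--     R = len(final_changes)
--
--     max_c = 0
--     for row_dict in final_changes:
--         if row_dict:
--             max_c = max(max_c, max(row_dict.keys()))
--     C = max_c + 1
--
--     visited = [[False for _ in range(C)] for _ in range(R)]
--     dfs_path = []
--
--     DIRECTIONS = [
--         (-1, -1),
--         (1, -1),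
--         (-1, 0),
--         (1, 0),
--         (0, -1),
--         (-1, 1),
--         (1, 1),
--         (0, 1),
--     ]
--
--     def dfs(r, c):
--         if not (0 <= r < R and 0 <= c < C):
--             return
--
--         if visited[r][c]:
--             return
--
--         if c not in final_changes[r]:
--             return
--
--         visited[r][c] = True
--         dfs_path.append((r, c))
--
--         for dr, dc in DIRECTIONS:
--             nr, nc = r + dr, c + dc
--             dfs(nr, nc)
--
--     dfs(0, list(final_changes[0].keys())[0])
--
--     return dfs_path
-- ===== SOURCE B (Python) =====
-- def reconstruct_dfs_path(final_changes: list[dict[int, int]]) -> list[tuple[int, int]]: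
--     # Different decomposition and data structure: instead of a visited boolean grid
--     # with bounds/visited/membership guards inside a recursive dfs, precompute the
--     # set of visitable cells once and run an iterative explicit-stack DFS that only
--     # tests/removes membership in that shrinking set.  A cell (r, c) is visitable
--     # iff c is a key of final_changes[r] and c >= 0 (r is automatically in range and
--     # c <= max key < C, so A's bounds checks reduce to c >= 0).  Neighbours are
--     # pushed in reversed direction order so the pop order matches A's pre-order.
--     remaining = set()
--     for r, row in enumerate(final_changes):
--         for c in row:
--             if c >= 0:
--                 remaining.add((r, c))
--
--     DIRECTIONS = [
--         (-1, -1),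
--         (1, -1),
--         (-1, 0),
--         (1, 0),
--         (0, -1),
--         (-1, 1),
--         (1, 1),
--         (0, 1),
--     ]
--
--     path = []
--     stack = [(0, list(final_changes[0].keys())[0])]
--     while stack:
--         cell = stack.pop()
--         if cell in remaining:
--             remaining.discard(cell)
--             path.append(cell)
--             r, c = cell
--             for dr, dc in reversed(DIRECTIONS):
--                 stack.append((r + dr, c + dc))
--     return path
-- ===== Notes on version B (the rewrite author's own statement) =====
-- stated objective: alternative
-- what changed: Replaces the recursive dfs over a visited boolean grid (bounds/visited/dict-membership guards per call) by a one-time precomputed set of visitable cells and an iterative explicit-stack DFS whose only guard is membership in that shrinking set; neighbours are pushed in reversed order so the emitted pre-order path is identical.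
import Mathlib
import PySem

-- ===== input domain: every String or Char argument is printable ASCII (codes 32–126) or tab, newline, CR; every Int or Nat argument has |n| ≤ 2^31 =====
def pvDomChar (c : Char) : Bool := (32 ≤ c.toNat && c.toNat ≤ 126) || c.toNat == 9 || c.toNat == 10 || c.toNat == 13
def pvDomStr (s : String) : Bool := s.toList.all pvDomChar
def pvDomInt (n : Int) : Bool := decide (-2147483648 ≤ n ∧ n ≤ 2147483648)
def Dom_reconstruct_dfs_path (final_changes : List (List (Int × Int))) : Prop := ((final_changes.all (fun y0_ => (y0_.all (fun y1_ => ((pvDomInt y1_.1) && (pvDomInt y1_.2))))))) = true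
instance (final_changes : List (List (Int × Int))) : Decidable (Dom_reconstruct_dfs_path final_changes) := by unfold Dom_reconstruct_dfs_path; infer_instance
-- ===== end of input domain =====

-- B replaces A's recursive dfs over a visited boolean grid (bounds/visited/membership
-- guards per call) by a precomputed set of visitable cells and an iterative
-- explicit-stack DFS whose only guard is membership in that shrinking set;
-- neighbours are pushed in reversed order, so the emitted pre-order path is identical.
-- Each Lean port uses a fuel argument only as a totality guard; the chosen fuel is
-- provably sufficient, so it never limits the computation.

-- shared small helpers
-- `dict.keys()` of a python dict built from this association list (dedup, first-occurrence order)
def pvKeys (row : List (Int × Int)) : List Int := (PySem.Dict.ofList row).keys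

def pvDirections : List (Int × Int) :=
  [(-1, -1), (1, -1), (-1, 0), (1, 0), (0, -1), (-1, 1), (1, 1), (0, 1)]

-- ===== PORT A =====
-- visited[r][c] = True  (r, c known to be in range when executed)
def pvMark (v : List (List Bool)) (r c : Int) : List (List Bool) :=
  v.set r.toNat ((v.getD r.toNat []).set c.toNat true)

-- max_c loop:  for row_dict in final_changes: if row_dict: max_c = max(max_c, max(row_dict.keys()))
def pvMaxC (final_changes : List (List (Int × Int))) : Int :=
  final_changes.foldl
    (fun m row =>
      if row.isEmpty then m
      else match PySem.List.max? (pvKeys row) (fun x => x) with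
        | some k => max m k
        | none => m) 0

-- the recursive dfs; the (visited, dfs_path) pair is the mutable state of A's closure
def pvDfsA (fc : List (List (Int × Int))) (R C : Int) :
    Nat → List (List Bool) → Int → Int → List (Int × Int) →
    List (List Bool) × List (Int × Int)
  | 0, v, _, _, acc => (v, acc)  -- fuel guard only; never reached with the fuel chosen below
  | fuel + 1, v, r, c, acc =>
    if ¬(0 ≤ r ∧ r < R ∧ 0 ≤ c ∧ c < C) then (v, acc)
    else if (v.getD r.toNat []).getD c.toNat false then (v, acc)
    else if ¬((fc.getD r.toNat []).any (fun p => p.1 == c)) then (v, acc)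
    else
      pvDirections.foldl
        (fun st d => pvDfsA fc R C fuel st.1 (r + d.1) (c + d.2) st.2)
        (pvMark v r c, acc ++ [(r, c)])

def reconstruct_dfs_path (final_changes : List (List (Int × Int))) : List (Int × Int) :=
  let R : Int := final_changes.length
  let C : Int := pvMaxC final_changes + 1
  let visited := List.replicate R.toNat (List.replicate C.toNat false)
  match (pvKeys (final_changes.getD 0 [])).head? with  -- list(final_changes[0].keys())[0]; none = IndexError, excluded by Pre_
  | none => []
  | some c0 => (pvDfsA final_changes R C (R.toNat * C.toNat + 1) visited 0 c0 []).2

-- ===== PORT B =====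
-- remaining = the set comprehension: for r,row in enumerate(final_changes): for c in row: if c >= 0: add (r,c)
def pvCellsRow (r : Int) (row : List (Int × Int)) (s : PySem.Set (Int × Int)) :
    PySem.Set (Int × Int) :=
  (pvKeys row).foldl (fun s c => if 0 ≤ c then PySem.Set.add s (r, c) else s) s

def pvCellsRows : Int → List (List (Int × Int)) → PySem.Set (Int × Int) → PySem.Set (Int × Int)
  | _, [], s => s
  | r, row :: rest, s => pvCellsRows (r + 1) rest (pvCellsRow r row s)

-- the 8 neighbours; pushed reversed onto the python stack (top = list end), so with
-- the stack modelled top-at-head the pops come off in DIRECTIONS order: prepend these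
def pvNbrs (cell : Int × Int) : List (Int × Int) :=
  pvDirections.map (fun d => (cell.1 + d.1, cell.2 + d.2))

-- the while loop over the explicit stack and the shrinking remaining-set
def pvLoopB : Nat → PySem.Set (Int × Int) → List (Int × Int) → List (Int × Int) →
    List (Int × Int)
  | 0, _, _, path => path  -- fuel guard only; never reached with the fuel chosen below
  | fuel + 1, rem, stack, path =>
    match stack with
    | [] => path
    | cell :: rest =>
      if cell ∈ rem then
        pvLoopB fuel (PySem.Set.discard rem cell) (pvNbrs cell ++ rest) (path ++ [cell])
      else pvLoopB fuel rem rest path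

def reconstruct_dfs_path_alt (final_changes : List (List (Int × Int))) : List (Int × Int) :=
  let remaining := pvCellsRows 0 final_changes PySem.Set.empty
  match (pvKeys (final_changes.getD 0 [])).head? with
  | none => []
  | some c0 => pvLoopB (9 * remaining.length + 2) remaining [(0, c0)] []

-- ===== PRECONDITION & SPEC =====
-- Pre_ excludes exactly the inputs on which A raises IndexError at
-- `list(final_changes[0].keys())[0]`: the empty list and a list whose first dict is empty.
def Pre_reconstruct_dfs_path (final_changes : List (List (Int × Int))) : Prop :=
  final_changes.headD [] ≠ []
instance (final_changes : List (List (Int × Int))) : Decidable (Pre_reconstruct_dfs_path final_changes) := by unfold Pre_reconstruct_dfs_path; infer_instance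

def pvWitness_reconstruct_dfs_path : (List (List (Int × Int))) := [[(0, 1), (2, 3)], [(1, 5)]]

def Spec_reconstruct_dfs_path (final_changes : List (List (Int × Int))) (out : List (Int × Int)) : Prop := out = reconstruct_dfs_path_alt final_changes
instance (final_changes : List (List (Int × Int))) (out : List (Int × Int)) : Decidable (Spec_reconstruct_dfs_path final_changes out) := by unfold Spec_reconstruct_dfs_path; infer_instance

-- ===== CLAIM (what is proved, stated in full; the proofs are below) =====
def Claim_equal_reconstruct_dfs_path : Prop := ∀ (final_changes : List (List (Int × Int))), Dom_reconstruct_dfs_path final_changes → Pre_reconstruct_dfs_path final_changes → Spec_reconstruct_dfs_path final_changes (reconstruct_dfs_path final_changes)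

-- ===== LEMMAS AND PROOFS =====

-- ---------- counting unvisited grid cells (termination measure of A) ----------
theorem cSetLe : ∀ (l : List Bool) (i : Nat),
    (l.set i true).countP (fun b => !b) ≤ l.countP (fun b => !b) := by
  intro l
  induction l with
  | nil => intro i; simp
  | cons h t ih =>
    intro i
    cases i with
    | zero => cases h <;> simp
    | succ k => simpa [List.countP_cons] using ih k

theorem cSetEq : ∀ (l : List Bool) (i : Nat), i < l.length → l.getD i false = false →
    (l.set i true).countP (fun b => !b) + 1 = l.countP (fun b => !b) := by
  intro l
  induction l with
  | nil => intro i h; simp at h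
  | cons h t ih =>
    intro i hi hf
    cases i with
    | zero => simp at hf; subst hf; simp
    | succ k =>
      simp at hi hf
      have := ih k hi hf
      simp [List.countP_cons]
      omega

def pvCF (v : List (List Bool)) : Nat := (v.map (fun row => row.countP (fun b => !b))).sum

theorem cfSetLe : ∀ (v : List (List Bool)) (i j : Nat),
    pvCF (v.set i ((v.getD i []).set j true)) ≤ pvCF v := by
  intro v
  induction v with
  | nil => intro i j; simp [pvCF]
  | cons h t ih =>
    intro i j
    cases i with
    | zero => simpa [pvCF] using cSetLe h j
    | succ k => simpa [pvCF] using ih k j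

theorem cfSetEq : ∀ (v : List (List Bool)) (i j : Nat), i < v.length →
    j < (v.getD i []).length → (v.getD i []).getD j false = false →
    pvCF (v.set i ((v.getD i []).set j true)) + 1 = pvCF v := by
  intro v
  induction v with
  | nil => intro i j h; simp at h
  | cons h t ih =>
    intro i j hi hj hf
    cases i with
    | zero =>
      simp at hj hf
      have := cSetEq h j hj hf
      simp [pvCF]; omega
    | succ k =>
      simp at hi hj hf
      have := ih k j hi hj hf
      simp [pvCF] at this ⊢
      omega

def pvSh (R C : Int) (v : List (List Bool)) : Prop :=
  v.length = R.toNat ∧ ∀ row ∈ v, row.length = C.toNat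

theorem pvSh_mark (R C : Int) (v : List (List Bool)) (r c : Int)
    (h : pvSh R C v) : pvSh R C (pvMark v r c) := by
  obtain ⟨h1, h2⟩ := h
  constructor
  · simp [pvMark, h1]
  · intro row hrow
    by_cases hlt : r.toNat < v.length
    · rcases List.mem_or_eq_of_mem_set hrow with hm | he
      · exact h2 row hm
      · subst he
        rw [List.getD_eq_getElem _ _ hlt, List.length_set]
        exact h2 _ (List.getElem_mem hlt)
    · rw [pvMark, List.set_eq_of_length_le (by omega)] at hrow
      exact h2 row hrow

theorem pvCF_mark_le (v : List (List Bool)) (r c : Int) :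
    pvCF (pvMark v r c) ≤ pvCF v := cfSetLe v r.toNat c.toNat

theorem pvCF_mark_lt (R C : Int) (v : List (List Bool)) (r c : Int)
    (h : pvSh R C v) (hr0 : 0 ≤ r) (hr : r < R) (hc0 : 0 ≤ c) (hc : c < C)
    (hf : (v.getD r.toNat []).getD c.toNat false = false) :
    pvCF (pvMark v r c) + 1 = pvCF v := by
  obtain ⟨h1, h2⟩ := h
  have hi : r.toNat < v.length := by omega
  have hj : c.toNat < (v.getD r.toNat []).length := by
    rw [List.getD_eq_getElem _ _ hi]
    rw [h2 _ (List.getElem_mem hi)]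
    omega
  exact cfSetEq v r.toNat c.toNat hi hj hf

-- ---------- A's recursion on a sequence of cells ----------
def pvDfsSeq (fc : List (List (Int × Int))) (R C : Int) (fuel : Nat)
    (st : List (List Bool) × List (Int × Int)) (cells : List (Int × Int)) :
    List (List Bool) × List (Int × Int) :=
  cells.foldl (fun st cell => pvDfsA fc R C fuel st.1 cell.1 cell.2 st.2) st

-- inner-loop foldl over directions IS pvDfsSeq on the mapped neighbour cells
theorem pvFold_eq_seq (fc : List (List (Int × Int))) (R C : Int) (fuel : Nat)
    (st : List (List Bool) × List (Int × Int)) (r c : Int) :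
    pvDirections.foldl (fun st d => pvDfsA fc R C fuel st.1 (r + d.1) (c + d.2) st.2) st
      = pvDfsSeq fc R C fuel st (pvNbrs (r, c)) := by
  rw [pvDfsSeq, pvNbrs, List.foldl_map]

theorem seq_mono_of (fc : List (List (Int × Int))) (R C : Int) (fuel : Nat)
    (H : ∀ v r c acc, pvCF (pvDfsA fc R C fuel v r c acc).1 ≤ pvCF v) :
    ∀ (cells : List (Int × Int)) (st : List (List Bool) × List (Int × Int)),
      pvCF (pvDfsSeq fc R C fuel st cells).1 ≤ pvCF st.1 := by
  intro cells
  induction cells with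
  | nil => intro st; simp [pvDfsSeq]
  | cons x xs ih =>
    intro st
    calc pvCF (pvDfsSeq fc R C fuel (pvDfsA fc R C fuel st.1 x.1 x.2 st.2) xs).1
        ≤ pvCF (pvDfsA fc R C fuel st.1 x.1 x.2 st.2).1 := ih _
      _ ≤ pvCF st.1 := H _ _ _ _

theorem pvDfsA_mono (fc : List (List (Int × Int))) (R C : Int) :
    ∀ (fuel : Nat) (v : List (List Bool)) (r c : Int) (acc : List (Int × Int)),
      pvCF (pvDfsA fc R C fuel v r c acc).1 ≤ pvCF v := by
  intro fuel
  induction fuel with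
  | zero => intro v r c acc; simp [pvDfsA]
  | succ n ih =>
    intro v r c acc
    rw [pvDfsA]
    split_ifs with h1 h2 h3
    all_goals try exact Nat.le_refl _
    rw [pvFold_eq_seq]
    calc pvCF (pvDfsSeq fc R C n _ _).1 ≤ pvCF (pvMark v r c) := seq_mono_of fc R C n ih _ _
        _ ≤ pvCF v := pvCF_mark_le v r c

theorem seq_sh_of (fc : List (List (Int × Int))) (R C : Int) (fuel : Nat)
    (H : ∀ v r c acc, pvSh R C v → pvSh R C (pvDfsA fc R C fuel v r c acc).1) :
    ∀ (cells : List (Int × Int)) (st : List (List Bool) × List (Int × Int)),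
      pvSh R C st.1 → pvSh R C (pvDfsSeq fc R C fuel st cells).1 := by
  intro cells
  induction cells with
  | nil => intro st h; simpa [pvDfsSeq] using h
  | cons x xs ih => intro st h; exact ih _ (H _ _ _ _ h)

theorem pvDfsA_sh (fc : List (List (Int × Int))) (R C : Int) :
    ∀ (fuel : Nat) (v : List (List Bool)) (r c : Int) (acc : List (Int × Int)),
      pvSh R C v → pvSh R C (pvDfsA fc R C fuel v r c acc).1 := by
  intro fuel
  induction fuel with
  | zero => intro v r c acc h; simpa [pvDfsA] using h
  | succ n ih =>
    intro v r c acc h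
    rw [pvDfsA]
    split_ifs with h1 h2 h3
    all_goals try exact h
    rw [pvFold_eq_seq]
    exact seq_sh_of fc R C n ih _ _ (pvSh_mark R C v r c h)

theorem seq_irrel_of (fc : List (List (Int × Int))) (R C : Int) (f1 f2 : Nat)
    (H : ∀ v r c acc, pvSh R C v → pvCF v < f1 → pvCF v < f2 →
          pvDfsA fc R C f1 v r c acc = pvDfsA fc R C f2 v r c acc) :
    ∀ (cells : List (Int × Int)) (st : List (List Bool) × List (Int × Int)),
      pvSh R C st.1 → pvCF st.1 < f1 → pvCF st.1 < f2 →
      pvDfsSeq fc R C f1 st cells = pvDfsSeq fc R C f2 st cells := by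
  intro cells
  induction cells with
  | nil => intro st _ _ _; rfl
  | cons x xs ih =>
    intro st hs h1 h2
    show pvDfsSeq fc R C f1 (pvDfsA fc R C f1 st.1 x.1 x.2 st.2) xs
        = pvDfsSeq fc R C f2 (pvDfsA fc R C f2 st.1 x.1 x.2 st.2) xs
    rw [← H st.1 x.1 x.2 st.2 hs h1 h2]
    exact ih _ (pvDfsA_sh fc R C f1 st.1 x.1 x.2 st.2 hs)
      (lt_of_le_of_lt (pvDfsA_mono fc R C f1 st.1 x.1 x.2 st.2) h1)
      (lt_of_le_of_lt (pvDfsA_mono fc R C f1 st.1 x.1 x.2 st.2) h2)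

theorem pvDfsA_irrel (fc : List (List (Int × Int))) (R C : Int) :
    ∀ (f1 : Nat) (f2 : Nat) (v : List (List Bool)) (r c : Int) (acc : List (Int × Int)),
      pvSh R C v → pvCF v < f1 → pvCF v < f2 →
      pvDfsA fc R C f1 v r c acc = pvDfsA fc R C f2 v r c acc := by
  intro f1
  induction f1 with
  | zero => intro f2 v r c acc _ h1 _; omega
  | succ n ih =>
    intro f2 v r c acc hs h1 h2
    cases f2 with
    | zero => omega
    | succ m =>
      rw [pvDfsA, pvDfsA]
      split_ifs with g1 g2 g3
      all_goals try rfl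
      rw [pvFold_eq_seq, pvFold_eq_seq]
      have hvf : (v.getD r.toNat []).getD c.toNat false = false := by
        simpa using g2
      obtain ⟨hr0, hr, hc0, hc⟩ := g1
      have hcf : pvCF (pvMark v r c) + 1 = pvCF v :=
        pvCF_mark_lt R C v r c hs hr0 hr hc0 hc hvf
      exact seq_irrel_of fc R C n m (fun v' r' c' acc' hs' a b => ih m v' r' c' acc' hs' a b)
        _ _ (pvSh_mark R C v r c hs) (by show pvCF (pvMark v r c) < n; omega)
        (by show pvCF (pvMark v r c) < m; omega)

-- ---------- the remaining-set: characterisation and invariant ----------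
-- membership in the inner fold of the set comprehension
theorem mem_addFold (r : Int) : ∀ (ks : List Int) (s : PySem.Set (Int × Int)) (p : Int × Int),
    p ∈ ks.foldl (fun s c => if 0 ≤ c then PySem.Set.add s (r, c) else s) s ↔
      p ∈ s ∨ (p.1 = r ∧ 0 ≤ p.2 ∧ p.2 ∈ ks) := by
  intro ks
  induction ks with
  | nil => intro s p; simp
  | cons k t ih =>
    intro s p
    rw [List.foldl_cons, ih]
    by_cases hk : 0 ≤ k
    · simp only [if_pos hk, PySem.Set.mem_add, List.mem_cons]
      constructor
      · rintro ((h | h) | h)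
        · exact Or.inl h
        · subst h; exact Or.inr ⟨rfl, hk, Or.inl rfl⟩
        · exact Or.inr ⟨h.1, h.2.1, Or.inr h.2.2⟩
      · rintro (h | ⟨h1, h2, (h3 | h3)⟩)
        · exact Or.inl (Or.inl h)
        · refine Or.inl (Or.inr ?_)
          obtain ⟨a, b⟩ := p; simp at h1 h3 ⊢; exact ⟨h1, h3⟩
        · exact Or.inr ⟨h1, h2, h3⟩
    · simp only [if_neg hk, List.mem_cons]
      constructor
      · rintro (h | h)
        · exact Or.inl h
        · exact Or.inr ⟨h.1, h.2.1, Or.inr h.2.2⟩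
      · rintro (h | ⟨h1, h2, (h3 | h3)⟩)
        · exact Or.inl h
        · exfalso; exact hk (h3 ▸ h2)
        · exact Or.inr ⟨h1, h2, h3⟩

theorem nodup_addFold (r : Int) : ∀ (ks : List Int) (s : PySem.Set (Int × Int)),
    s.Nodup → (ks.foldl (fun s c => if 0 ≤ c then PySem.Set.add s (r, c) else s) s).Nodup := by
  intro ks
  induction ks with
  | nil => intro s h; exact h
  | cons k t ih =>
    intro s h
    rw [List.foldl_cons]
    apply ih
    by_cases hk : 0 ≤ k
    · rw [if_pos hk]; exact PySem.Set.nodup_add s (r, k) h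
    · rwa [if_neg hk]

-- key membership through the Dict
theorem contains_update (c : Int) : ∀ (ps : List (Int × Int)) (d : PySem.Dict Int Int),
    (d.update ps).contains c = (d.contains c || ps.any (fun p => p.1 == c)) := by
  intro ps
  induction ps with
  | nil => intro d; simp [PySem.Dict.update]
  | cons p t ih =>
    intro d
    show ((d.insert p.1 p.2).update t).contains c = _
    rw [ih, PySem.Dict.contains_insert]
    simp only [List.any_cons, BEq.comm]
    cases p.1 == c <;> cases d.contains c <;> simp

theorem mem_pvKeys (row : List (Int × Int)) (c : Int) :
    c ∈ pvKeys row ↔ (row.any (fun p => p.1 == c)) = true := by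
  rw [pvKeys, ← PySem.Dict.contains_iff_mem_keys, PySem.Dict.ofList, contains_update]
  simp [PySem.Dict.contains, PySem.Dict.empty]

theorem mem_pvCellsRow (r : Int) (row : List (Int × Int)) (s : PySem.Set (Int × Int))
    (p : Int × Int) :
    p ∈ pvCellsRow r row s ↔ p ∈ s ∨ (p.1 = r ∧ 0 ≤ p.2 ∧ p.2 ∈ pvKeys row) := by
  rw [pvCellsRow]
  exact mem_addFold r (pvKeys row) s p

theorem nodup_pvCellsRow (r : Int) (row : List (Int × Int)) (s : PySem.Set (Int × Int))
    (h : s.Nodup) : (pvCellsRow r row s).Nodup := nodup_addFold r (pvKeys row) s h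

theorem mem_pvCellsRows : ∀ (rows : List (List (Int × Int))) (r : Int)
    (s : PySem.Set (Int × Int)) (p : Int × Int),
    p ∈ pvCellsRows r rows s ↔ p ∈ s ∨
      ∃ i : Nat, i < rows.length ∧ p.1 = r + i ∧ 0 ≤ p.2 ∧ p.2 ∈ pvKeys (rows.getD i []) := by
  intro rows
  induction rows with
  | nil => intro r s p; simp [pvCellsRows]
  | cons row rest ih =>
    intro r s p
    rw [pvCellsRows, ih, mem_pvCellsRow]
    constructor
    · rintro ((h | ⟨h1, h2, h3⟩) | ⟨i, hi, h1, h2, h3⟩)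
      · exact Or.inl h
      · exact Or.inr ⟨0, by simp, by omega, h2, by simpa using h3⟩
      · exact Or.inr ⟨i + 1, by simpa using hi, by omega, h2, by simpa using h3⟩
    · rintro (h | ⟨i, hi, h1, h2, h3⟩)
      · exact Or.inl (Or.inl h)
      · cases i with
        | zero => exact Or.inl (Or.inr ⟨by omega, h2, by simpa using h3⟩)
        | succ j =>
          exact Or.inr ⟨j, by simpa using hi, by omega, h2, by simpa using h3⟩

theorem nodup_pvCellsRows : ∀ (rows : List (List (Int × Int))) (r : Int)
    (s : PySem.Set (Int × Int)), s.Nodup → (pvCellsRows r rows s).Nodup := by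
  intro rows
  induction rows with
  | nil => intro r s h; exact h
  | cons row rest ih =>
    intro r s h
    exact ih _ _ (nodup_pvCellsRow r row s h)

-- the max_c fold only grows
theorem maxFold_ge : ∀ (rows : List (List (Int × Int))) (m : Int),
    m ≤ rows.foldl (fun m row =>
      if row.isEmpty then m
      else match PySem.List.max? (pvKeys row) (fun x => x) with
        | some k => max m k
        | none => m) m := by
  intro rows
  induction rows with
  | nil => intro m; exact le_refl m
  | cons row rest ih =>
    intro m
    rw [List.foldl_cons]
    refine le_trans ?_ (ih _)
    split
    · exact le_refl m
    · split
      · exact le_max_left _ _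
      · exact le_refl m

theorem le_maxFold : ∀ (rows : List (List (Int × Int))) (i : Nat) (c m : Int),
    i < rows.length → c ∈ pvKeys (rows.getD i []) →
    c ≤ rows.foldl (fun m row =>
      if row.isEmpty then m
      else match PySem.List.max? (pvKeys row) (fun x => x) with
        | some k => max m k
        | none => m) m := by
  intro rows
  induction rows with
  | nil => intro i c m hi; simp at hi
  | cons row rest ih =>
    intro i c m hi hc
    rw [List.foldl_cons]
    cases i with
    | zero =>
      simp only [List.getD_cons_zero] at hc
      have hne : row ≠ [] := by
        rintro rfl
        simp [pvKeys, PySem.Dict.ofList, PySem.Dict.update, PySem.Dict.empty,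
          PySem.Dict.keys] at hc
      refine le_trans ?_ (maxFold_ge rest _)
      rw [if_neg (by simpa [List.isEmpty_iff] using hne)]
      cases hmax : PySem.List.max? (pvKeys row) (fun x => x) with
      | none =>
        exact absurd ((PySem.List.max?_eq_none_iff (pvKeys row) (fun x => x)).mp hmax)
          (List.ne_nil_of_mem hc)
      | some k =>
        exact le_trans (PySem.List.max?_isMax hmax c hc) (le_max_right _ _)
    | succ j =>
      simp only [List.getD_cons_succ] at hc
      exact ih j c _ (by simpa using hi) hc

-- any key of any row is ≤ pvMaxC
theorem le_pvMaxC (fc : List (List (Int × Int))) (i : Nat) (c : Int)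
    (hi : i < fc.length) (hc : c ∈ pvKeys (fc.getD i [])) : c ≤ pvMaxC fc :=
  le_maxFold fc i c 0 hi hc

-- effect of pvMark on a single lookup (nonnegative coordinates, in-range marked cell)
theorem pvMark_getD (R C : Int) (v : List (List Bool)) (r c r' c' : Int)
    (hs : pvSh R C v) (hr0 : 0 ≤ r) (hr : r < R) (hc0 : 0 ≤ c) (hc : c < C)
    (hr'0 : 0 ≤ r') (hc'0 : 0 ≤ c') :
    ((pvMark v r c).getD r'.toNat []).getD c'.toNat false =
      if r' = r ∧ c' = c then true
      else (v.getD r'.toNat []).getD c'.toNat false := by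
  obtain ⟨hlen, hrows⟩ := hs
  have hrn : r.toNat < v.length := by omega
  have hrowlen : (v.getD r.toNat []).length = C.toNat := by
    rw [List.getD_eq_getElem _ _ hrn]
    exact hrows _ (List.getElem_mem hrn)
  have hcn : c.toNat < (v.getD r.toNat []).length := by omega
  by_cases hr' : r' = r
  · subst hr'
    have houter : (pvMark v r' c).getD r'.toNat [] = (v.getD r'.toNat []).set c.toNat true := by
      rw [pvMark, List.getD_eq_getElem?_getD, List.getElem?_set, if_pos rfl, if_pos hrn]
      rfl
    rw [houter]
    by_cases hc' : c' = c
    · subst hc'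
      rw [if_pos ⟨rfl, rfl⟩, List.getD_eq_getElem?_getD, List.getElem?_set,
        if_pos rfl, if_pos hcn]
      rfl
    · have hcn' : c.toNat ≠ c'.toNat := by omega
      rw [if_neg (by tauto), List.getD_eq_getElem?_getD, List.getElem?_set, if_neg hcn',
        ← List.getD_eq_getElem?_getD]
  · have hrn' : r.toNat ≠ r'.toNat := by omega
    have houter : (pvMark v r c).getD r'.toNat [] = v.getD r'.toNat [] := by
      rw [pvMark, List.getD_eq_getElem?_getD, List.getElem?_set, if_neg hrn',
        ← List.getD_eq_getElem?_getD]
    rw [if_neg (by tauto), houter]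

-- every cell of the initial replicate grid reads unvisited
theorem unvisited_init (a b : Nat) (i j : Nat) :
    ((List.replicate a (List.replicate b false)).getD i []).getD j false = false := by
  simp only [List.getD_eq_getElem?_getD, List.getElem?_replicate]
  by_cases hi : i < a <;> by_cases hj : j < b <;> simp [hi, hj]

-- the coupling invariant between A's visited grid and B's remaining set
def pvInv (fc : List (List (Int × Int))) (R C : Int) (v : List (List Bool))
    (rem : PySem.Set (Int × Int)) : Prop :=
  rem.Nodup ∧ ∀ p : Int × Int,
    p ∈ rem ↔ (0 ≤ p.1 ∧ p.1 < R ∧ 0 ≤ p.2 ∧ p.2 < C ∧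
      ((v.getD p.1.toNat []).getD p.2.toNat false) = false ∧
      ((fc.getD p.1.toNat []).any (fun q => q.1 == p.2)) = true)

theorem pvInv_init (fc : List (List (Int × Int))) :
    pvInv fc fc.length (pvMaxC fc + 1)
      (List.replicate (fc.length : Int).toNat (List.replicate (pvMaxC fc + 1).toNat false))
      (pvCellsRows 0 fc PySem.Set.empty) := by
  constructor
  · exact nodup_pvCellsRows fc 0 PySem.Set.empty List.nodup_nil
  · intro p
    rw [mem_pvCellsRows]
    constructor
    · rintro (h | ⟨i, hi, h1, h2, h3⟩)
      · simp [PySem.Set.empty] at h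
      · have hb : 0 ≤ p.1 ∧ p.1 < (fc.length : Int) := by omega
        have hnat : p.1.toNat = i := by omega
        refine ⟨hb.1, hb.2, h2, ?_, ?_, ?_⟩
        · have := le_pvMaxC fc i p.2 hi h3
          omega
        · exact unvisited_init _ _ _ _
        · rw [hnat]
          exact (mem_pvKeys _ _).mp h3
    · rintro ⟨h1, h2, h3, h4, h5, h6⟩
      refine Or.inr ⟨p.1.toNat, by omega, by omega, h3, (mem_pvKeys _ _).mpr h6⟩

theorem pvInv_step (fc : List (List (Int × Int))) (R C : Int) (v : List (List Bool))
    (rem : PySem.Set (Int × Int)) (cell : Int × Int)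
    (hs : pvSh R C v) (hinv : pvInv fc R C v rem) (hm : cell ∈ rem) :
    pvInv fc R C (pvMark v cell.1 cell.2) (PySem.Set.discard rem cell) := by
  obtain ⟨hnd, hmem⟩ := hinv
  obtain ⟨hb1, hb2, hb3, hb4, hunvis, hkey⟩ := (hmem cell).mp hm
  refine ⟨PySem.Set.nodup_discard rem cell hnd, ?_⟩
  intro p
  rw [PySem.Set.mem_discard, hmem p]
  constructor
  · rintro ⟨⟨g1, g2, g3, g4, g5, g6⟩, hne⟩
    refine ⟨g1, g2, g3, g4, ?_, g6⟩
    rw [pvMark_getD R C v cell.1 cell.2 p.1 p.2 ⟨hs.1, hs.2⟩ hb1 hb2 hb3 hb4 g1 g3,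
      if_neg (fun h => hne (Prod.ext_iff.mpr h)), g5]
  · rintro ⟨g1, g2, g3, g4, g5, g6⟩
    rw [pvMark_getD R C v cell.1 cell.2 p.1 p.2 ⟨hs.1, hs.2⟩ hb1 hb2 hb3 hb4 g1 g3] at g5
    by_cases hpc : p.1 = cell.1 ∧ p.2 = cell.2
    · rw [if_pos hpc] at g5
      exact absurd g5 (by simp)
    · rw [if_neg hpc] at g5
      exact ⟨⟨g1, g2, g3, g4, g5, g6⟩, fun h => hpc (by rw [h]; exact ⟨rfl, rfl⟩)⟩

theorem discard_length (s : PySem.Set (Int × Int)) (x : Int × Int)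
    (hn : s.Nodup) (hm : x ∈ s) :
    (PySem.Set.discard s x).length + 1 = s.length := by
  have h2 : s.countP (fun y => y == x) = 1 := by
    have := List.count_eq_one_of_mem hn hm
    simpa [List.count] using this
  have h3 := List.length_eq_countP_add_countP (fun y => y == x) (l := s)
  have h1 : (PySem.Set.discard s x).length = s.countP (fun y => decide ¬((y == x) = true)) := by
    rw [PySem.Set.discard, ← List.countP_eq_length_filter]
    congr 1
    funext y; cases h : y == x <;> simp
  omega

-- ---------- B's loop equals A's recursion under the invariant ----------
theorem pvLoop_eq_seq (fc : List (List (Int × Int))) (R C : Int) :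
    ∀ (fB : Nat) (fA : Nat) (v : List (List Bool)) (rem : PySem.Set (Int × Int))
      (stack : List (Int × Int)) (path : List (Int × Int)),
      pvSh R C v → pvInv fc R C v rem → pvCF v < fA →
      stack.length + 9 * rem.length < fB →
      pvLoopB fB rem stack path = (pvDfsSeq fc R C fA (v, path) stack).2 := by
  intro fB
  induction fB with
  | zero => intro fA v rem stack path _ _ _ hB; omega
  | succ n ih =>
    intro fA v rem stack path hs hinv hA hB
    cases stack with
    | nil => rfl
    | cons cell rest =>
      cases fA with
      | zero => omega
      | succ m =>
        obtain ⟨r, c⟩ := cell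
        show pvLoopB (n + 1) rem ((r, c) :: rest) path
            = (pvDfsSeq fc R C (m + 1) (pvDfsA fc R C (m + 1) v r c path) rest).2
        rw [pvLoopB, pvDfsA]
        by_cases hm : (r, c) ∈ rem
        · -- the cell is visitable: all of A's guards pass
          obtain ⟨hb1, hb2, hb3, hb4, hunvis, hkey⟩ := (hinv.2 (r, c)).mp hm
          have hub : ¬¬(0 ≤ r ∧ r < R ∧ 0 ≤ c ∧ c < C) :=
            not_not_intro ⟨hb1, hb2, hb3, hb4⟩
          have hv : ¬((v.getD r.toNat []).getD c.toNat false = true) := by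
            simpa using hunvis
          have hk : ¬¬(((fc.getD r.toNat []).any (fun q => q.1 == c)) = true) :=
            not_not_intro (by simpa using hkey)
          rw [if_pos hm, if_neg hub, if_neg hv, if_neg hk]
          have hdl := discard_length rem (r, c) hinv.1 hm
          have hsh' := pvSh_mark R C v r c hs
          have hcf : pvCF (pvMark v r c) + 1 = pvCF v :=
            pvCF_mark_lt R C v r c hs hb1 hb2 hb3 hb4 hunvis
          rw [ih (m + 1) (pvMark v r c) (PySem.Set.discard rem (r, c))
                (pvNbrs (r, c) ++ rest) (path ++ [(r, c)]) hsh'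
                (pvInv_step fc R C v rem (r, c) hs ⟨hinv.1, hinv.2⟩ hm) (by omega)
                (by simp [pvNbrs, pvDirections] at hB ⊢; omega)]
          rw [pvDfsSeq, List.foldl_append]
          rw [pvFold_eq_seq]
          show (pvDfsSeq fc R C (m + 1)
              (pvDfsSeq fc R C (m + 1) (pvMark v r c, path ++ [(r, c)]) (pvNbrs (r, c))) rest).2
            = (pvDfsSeq fc R C (m + 1)
              (pvDfsSeq fc R C m (pvMark v r c, path ++ [(r, c)]) (pvNbrs (r, c))) rest).2
          rw [seq_irrel_of fc R C (m + 1) m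
            (fun v' r' c' acc' hs' a b => pvDfsA_irrel fc R C (m + 1) m v' r' c' acc' hs' a b)
            (pvNbrs (r, c)) (pvMark v r c, path ++ [(r, c)]) hsh'
            (by show pvCF (pvMark v r c) < m + 1; omega)
            (by show pvCF (pvMark v r c) < m; omega)]
        · -- the cell is not visitable: some guard of A fires, both sides skip it
          rw [if_neg hm]
          have hskip : pvLoopB n rem rest path = (pvDfsSeq fc R C (m + 1) (v, path) rest).2 :=
            ih (m + 1) v rem rest path hs hinv hA (by simp at hB ⊢; omega)
          by_cases g1 : ¬(0 ≤ r ∧ r < R ∧ 0 ≤ c ∧ c < C)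
          · rw [if_pos g1]; exact hskip
          · rw [if_neg g1]
            by_cases g2 : (v.getD r.toNat []).getD c.toNat false = true
            · rw [if_pos g2]; exact hskip
            · rw [if_neg g2]
              by_cases g3 : ¬(((fc.getD r.toNat []).any (fun q => q.1 == c)) = true)
              · rw [if_pos g3]; exact hskip
              · rw [if_neg g3]
                exact absurd ((hinv.2 (r, c)).mpr
                  ⟨(not_not.mp g1).1, (not_not.mp g1).2.1, (not_not.mp g1).2.2.1,
                    (not_not.mp g1).2.2.2, eq_false_of_ne_true g2, not_not.mp g3⟩) hm

theorem pvSh_init (R C : Int) :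
    pvSh R C (List.replicate R.toNat (List.replicate C.toNat false)) := by
  constructor
  · simp
  · intro row hrow
    rw [List.eq_of_mem_replicate hrow]
    simp

theorem pvCF_init (R C : Int) :
    pvCF (List.replicate R.toNat (List.replicate C.toNat false)) = R.toNat * C.toNat := by
  simp [pvCF, List.map_replicate, List.countP_replicate]

theorem main_eq (fc : List (List (Int × Int))) (c0 : Int) :
    pvLoopB (9 * (pvCellsRows 0 fc PySem.Set.empty).length + 2)
        (pvCellsRows 0 fc PySem.Set.empty) [(0, c0)] []
      = (pvDfsA fc fc.length (pvMaxC fc + 1)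
          ((fc.length : Int).toNat * (pvMaxC fc + 1).toNat + 1)
          (List.replicate (fc.length : Int).toNat
            (List.replicate (pvMaxC fc + 1).toNat false)) 0 c0 []).2 := by
  rw [pvLoop_eq_seq fc fc.length (pvMaxC fc + 1) _ _ _ _ [(0, c0)] [] (pvSh_init _ _)
      (pvInv_init fc) (by rw [pvCF_init]; exact Nat.lt_succ_self _) (by simp; omega)]
  rfl

-- ===== VERDICT (by name: the statement is the Claim_ definition above) =====
theorem reconstruct_dfs_path_spec : Claim_equal_reconstruct_dfs_path := by
  intro fc _dom _pre
  unfold Spec_reconstruct_dfs_path reconstruct_dfs_path reconstruct_dfs_path_alt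
  cases h : (pvKeys (fc.getD 0 [])).head? with
  | none => rfl
  | some c0 => exact (main_eq fc c0).symm
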